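-- pv_equiv track=rewrite | github.com/nsaje/dotfiles | server/dash/publisher_helpers.py | is_subdomain_match
-- ===== SOURCE A (Python) =====
-- def strip_prefix(publisher, prefixes=("http://", "https://")):
--     for prefix in prefixes:
--         publisher = publisher.replace(prefix, "")
--     return publisher
--
-- def is_subdomain_match(listed_publisher, publisher):
--     listed_split = listed_publisher.split(".")
--     listed_split.reverse()
--
--     publisher_split = strip_prefix(publisher).split(".")
--     publisher_split.reverse()
--
--     for i, part in enumerate(listed_split):
--         if len(publisher_split) < i + 1:
--             return False
--
--         if listed_split[i] != publisher_split[i]: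
--             return False
--
--     return True
-- ===== SOURCE B (Python) =====
-- def strip_prefix(publisher, prefixes=("http://", "https://")):
--     for prefix in prefixes:
--         publisher = publisher.replace(prefix, "")
--     return publisher
--
-- def is_subdomain_match(listed_publisher, publisher):
--     stripped = strip_prefix(publisher)
--     return stripped == listed_publisher or stripped.endswith("." + listed_publisher)
-- ===== Notes on version B (the rewrite author's own statement) =====
-- stated objective: idiomatic
-- what changed: B replaces the split/reverse/index-loop component comparison by a direct string check: stripped == listed or stripped.endswith('.' + listed).
import Mathlib
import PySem

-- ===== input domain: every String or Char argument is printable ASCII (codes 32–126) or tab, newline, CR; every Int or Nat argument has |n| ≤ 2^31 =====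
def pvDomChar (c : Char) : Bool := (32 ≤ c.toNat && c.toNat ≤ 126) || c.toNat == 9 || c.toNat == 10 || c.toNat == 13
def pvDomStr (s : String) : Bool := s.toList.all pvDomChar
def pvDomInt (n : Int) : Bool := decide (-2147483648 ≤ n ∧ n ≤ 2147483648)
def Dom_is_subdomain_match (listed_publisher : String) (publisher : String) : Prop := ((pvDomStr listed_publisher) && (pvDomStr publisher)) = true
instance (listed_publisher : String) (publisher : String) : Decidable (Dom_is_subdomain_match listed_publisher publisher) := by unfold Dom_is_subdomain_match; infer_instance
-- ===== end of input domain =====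

-- B checks the dot-component suffix condition directly on the stripped string
-- (equality or endswith("." + listed)) instead of A's split/reverse/index loop; same cost, more idiomatic.

-- ===== PORT A =====
-- strip_prefix: 'for prefix in prefixes: publisher = publisher.replace(prefix, "")'
def strip_prefix (publisher : String) : String :=
  ["http://", "https://"].foldl (fun p pre => PySem.Str.replace p pre "") publisher

-- the 'for i, part in enumerate(listed_split)' loop with its two early 'return False':
-- at each i it first checks len(publisher_split) < i+1, then listed_split[i] != publisher_split[i]
def loopA : List (List Char) → List (List Char) → Bool
  | [], _ => true
  | _ :: _, [] => false
  | a :: ls, b :: ps => if a ≠ b then false else loopA ls ps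

def is_subdomain_match (listed_publisher : String) (publisher : String) : Bool :=
  let listed_split := (PySem.Chars.splitOn listed_publisher.toList ['.']).reverse
  let publisher_split := (PySem.Chars.splitOn (strip_prefix publisher).toList ['.']).reverse
  loopA listed_split publisher_split

-- ===== PORT B =====
-- '.' :: listed_publisher.toList is exactly ("." + listed_publisher).toList
def is_subdomain_match_alt (listed_publisher : String) (publisher : String) : Bool :=
  let stripped := strip_prefix publisher
  stripped == listed_publisher || PySem.Chars.endswith stripped.toList ('.' :: listed_publisher.toList)

-- ===== PRECONDITION & SPEC =====
def Spec_is_subdomain_match (listed_publisher : String) (publisher : String) (out : Bool) : Prop := out = is_subdomain_match_alt listed_publisher publisher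
instance (listed_publisher : String) (publisher : String) (out : Bool) : Decidable (Spec_is_subdomain_match listed_publisher publisher out) := by unfold Spec_is_subdomain_match; infer_instance

-- ===== CLAIM (what is proved, stated in full; the proofs are below) =====
def Claim_equal_is_subdomain_match : Prop := ∀ (listed_publisher : String) (publisher : String), Dom_is_subdomain_match listed_publisher publisher → Spec_is_subdomain_match listed_publisher publisher (is_subdomain_match listed_publisher publisher)

-- ===== LEMMAS AND PROOFS =====

theorem modifyHead_id' {α : Type} (l : List α) : List.modifyHead (fun x => x) l = l := by
  cases l <;> rfl

-- a structural-recursion model of s.split(".")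
def mysplit : List Char → List (List Char)
  | [] => [[]]
  | c :: r => if c = '.' then [] :: mysplit r else (mysplit r).modifyHead (c :: ·)

theorem mysplit_ne_nil (s : List Char) : mysplit s ≠ [] := by
  cases s with
  | nil => simp [mysplit]
  | cons c r =>
    simp only [mysplit]
    split
    · simp
    · cases h : mysplit r with
      | nil => exact absurd h (mysplit_ne_nil r)
      | cons a t => simp

theorem go_spec (fuel : Nat) (l cur : List Char) (acc : List (List Char)) (h : l.length ≤ fuel) :
    PySem.Chars.splitOn.go ['.'] fuel l cur acc
      = acc.reverse ++ (mysplit l).modifyHead (cur.reverse ++ ·) := by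
  induction fuel generalizing l cur acc with
  | zero =>
    have : l = [] := by cases l <;> simp_all
    subst this
    simp [PySem.Chars.splitOn.go, mysplit]
  | succ n ih =>
    cases l with
    | nil => simp [PySem.Chars.splitOn.go, mysplit]
    | cons c rest =>
      by_cases hc : c = '.'
      · subst hc
        have hpre : List.isPrefixOf ['.'] ('.' :: rest) = true := by simp [List.isPrefixOf]
        rw [show PySem.Chars.splitOn.go ['.'] (n+1) ('.' :: rest) cur acc
              = PySem.Chars.splitOn.go ['.'] n rest [] (cur.reverse :: acc) by
            simp [PySem.Chars.splitOn.go, hpre]]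
        rw [ih rest [] (cur.reverse :: acc) (by simpa using Nat.le_of_succ_le_succ h)]
        simp [mysplit, modifyHead_id']
      · have hpre : List.isPrefixOf ['.'] (c :: rest) = false := by
          simp [List.isPrefixOf]
          exact fun hh => absurd hh.symm hc
        rw [show PySem.Chars.splitOn.go ['.'] (n+1) (c :: rest) cur acc
              = PySem.Chars.splitOn.go ['.'] n rest (c :: cur) acc by
            simp [PySem.Chars.splitOn.go, hpre]]
        rw [ih rest (c :: cur) acc (by simpa using Nat.le_of_succ_le_succ h)]
        obtain ⟨hd, tl, he⟩ := List.exists_cons_of_ne_nil (mysplit_ne_nil rest)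
        simp [mysplit, hc, he]

theorem splitOn_eq_mysplit (s : List Char) : PySem.Chars.splitOn s ['.'] = mysplit s := by
  have := go_spec (s.length + 1) s [] [] (by omega)
  simpa [PySem.Chars.splitOn, modifyHead_id'] using this

-- intercalating "." recovers the string, hence mysplit is injective
def unsplit : List (List Char) → List Char
  | [] => []
  | [x] => x
  | x :: y :: t => x ++ '.' :: unsplit (y :: t)

theorem unsplit_mysplit (s : List Char) : unsplit (mysplit s) = s := by
  induction s with
  | nil => simp [mysplit, unsplit]
  | cons c r ih =>
    obtain ⟨hd, tl, he⟩ := List.exists_cons_of_ne_nil (mysplit_ne_nil r)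
    by_cases hc : c = '.'
    · subst hc
      simp only [mysplit, he] at *
      simpa [unsplit] using ih
    · simp only [mysplit, if_neg hc, he] at *
      cases tl with
      | nil => simpa [unsplit] using ih
      | cons y t => simpa [unsplit] using ih

theorem mysplit_inj {a b : List Char} (h : mysplit a = mysplit b) : a = b := by
  have := unsplit_mysplit a
  rw [h, unsplit_mysplit] at this
  exact this.symm

theorem loopA_eq_prefix (ls ps : List (List Char)) : loopA ls ps = true ↔ ls <+: ps := by
  induction ls generalizing ps with
  | nil => simp [loopA]
  | cons a ls ih =>
    cases ps with
    | nil => simp [loopA]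
    | cons b ps =>
      by_cases hab : a = b
      · subst hab
        simp [loopA, ih, List.cons_prefix_cons]
      · simp [loopA, hab, List.cons_prefix_cons]

theorem main_iff (L S : List Char) :
    mysplit L <:+ mysplit S ↔ (S = L ∨ ('.' :: L) <:+ S) := by
  induction S with
  | nil =>
    constructor
    · intro hsuf
      left
      have h1 : mysplit L = [] ∨ mysplit L = [[]] :=
        List.sublist_singleton.mp (by simpa [mysplit] using hsuf.sublist)
      rcases h1 with h1 | h1
      · exact absurd h1 (mysplit_ne_nil L)
      · exact mysplit_inj (show mysplit [] = mysplit L by simp [mysplit, h1])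
    · rintro (rfl | habs)
      · exact List.suffix_refl _
      · simp at habs
  | cons c r ih =>
    by_cases hc : c = '.'
    · subst hc
      have hms : mysplit ('.' :: r) = [] :: mysplit r := by simp [mysplit]
      rw [hms, List.suffix_cons_iff]
      constructor
      · rintro (heq | hsuf)
        · left; exact mysplit_inj (hms.trans heq.symm)
        · rcases ih.mp hsuf with rfl | hs
          · right; exact List.suffix_refl _
          · right; exact hs.trans (List.suffix_cons '.' r)
      · rintro (heq | hsuf)
        · subst heq; exact Or.inl hms
        · rcases List.suffix_cons_iff.mp hsuf with heq | hs
          · have hLr : L = r := (List.cons.inj heq).2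
            subst hLr
            right; exact List.suffix_refl _
          · right; exact ih.mpr (Or.inr hs)
    · obtain ⟨hd, tl, he⟩ := List.exists_cons_of_ne_nil (mysplit_ne_nil r)
      have hms : mysplit (c :: r) = (c :: hd) :: tl := by simp [mysplit, hc, he]
      have ihr : mysplit L <:+ hd :: tl ↔ r = L ∨ '.' :: L <:+ r := by
        rw [← he]; exact ih
      rw [hms, List.suffix_cons_iff]
      constructor
      · rintro (heq | hsuf)
        · left; exact mysplit_inj (hms.trans heq.symm)
        · right
          have hlen : mysplit L ≠ hd :: tl := by
            intro hcontra
            have := hcontra ▸ hsuf.length_le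
            simp at this
          have h1 : mysplit L <:+ hd :: tl := hsuf.trans (List.suffix_cons hd tl)
          rcases ihr.mp h1 with rfl | hs
          · exact absurd he hlen
          · exact hs.trans (List.suffix_cons c r)
      · rintro (heq | hsuf)
        · left; rw [← heq]; exact hms
        · rcases List.suffix_cons_iff.mp hsuf with heq | hs
          · exact absurd heq (by intro hh; injection hh with h1 _; exact hc h1.symm)
          · have h1 : mysplit L <:+ hd :: tl := ihr.mpr (Or.inr hs)
            rcases List.suffix_cons_iff.mp h1 with heq2 | h2
            · exfalso
              have hLr : L = r := mysplit_inj (heq2.trans he.symm)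
              subst hLr
              have := hs.length_le
              simp at this
            · right; exact h2

-- ===== VERDICT (by name: the statement is the Claim_ definition above) =====
theorem is_subdomain_match_spec : Claim_equal_is_subdomain_match := by
  intro lp pub _hdom
  unfold Spec_is_subdomain_match is_subdomain_match is_subdomain_match_alt
  simp only [splitOn_eq_mysplit]
  rw [Bool.eq_iff_iff]
  rw [loopA_eq_prefix, List.reverse_prefix]
  rw [main_iff]
  simp [PySem.Chars.endswith, List.isSuffixOf_iff_suffix, ← String.toList_inj]
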